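-- pv_equiv track=rewrite | github.com/sireesha-siri/Geeks_For_Geeks | Array_Basic/Find_the_smallest_and_second_smallest_element_in_an_array.py | minAnd2ndMin
-- ===== SOURCE A (Python) =====
-- def minAnd2ndMin( a, n):
--     #code here
--     a = sorted(set(a))
--     l = []
--     if len(a) > 1:
--         for i in range(2):
--             l.append(a[i])
--     if len(l) == 2:
--         return l
--     else:
--         return [-1]
-- ===== SOURCE B (Python) =====
-- def minAnd2ndMin(a, n):
--     first = None
--     second = None
--     for x in a:
--         if first is None or x < first:
--             second = first
--             first = x
--         elif x > first and (second is None or x < second):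
--             second = x
--     if second is None:
--         return [-1]
--     return [first, second]
-- ===== Notes on version B (the rewrite author's own statement) =====
-- stated objective: faster
-- what changed: A builds a set, sorts its elements and takes the first two; B makes one linear scan maintaining the smallest and second-smallest distinct values seen so far, with no set and no sort.
import Mathlib
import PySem

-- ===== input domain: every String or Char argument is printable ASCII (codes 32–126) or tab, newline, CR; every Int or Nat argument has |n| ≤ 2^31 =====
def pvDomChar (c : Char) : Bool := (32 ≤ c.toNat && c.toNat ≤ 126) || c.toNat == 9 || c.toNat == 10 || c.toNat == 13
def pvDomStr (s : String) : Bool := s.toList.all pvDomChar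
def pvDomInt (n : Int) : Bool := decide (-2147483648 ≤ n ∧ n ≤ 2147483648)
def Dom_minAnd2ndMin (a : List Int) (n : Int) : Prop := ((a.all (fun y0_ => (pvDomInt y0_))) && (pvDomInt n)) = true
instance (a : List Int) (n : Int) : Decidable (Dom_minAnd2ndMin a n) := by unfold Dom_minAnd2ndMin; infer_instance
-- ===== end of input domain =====

-- B replaces A's build-a-set-then-sort with a single linear scan keeping the two
-- smallest distinct values seen so far (objective: faster — no sort, no set).

-- ===== PORT A =====
-- a = sorted(set(a)); l = first two if len > 1; return l if len(l) == 2 else [-1]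
def minAnd2ndMin (a : List Int) (n : Int) : List Int :=
  let s := PySem.List.sorted (PySem.Set.ofList a) (fun x => x) false
  let l : List Int :=
    if 1 < (s.length : Int) then
      (PySem.List.pyRange 0 2 1).foldl (fun acc i => acc ++ [PySem.List.pyGetD s i 0]) []
    else []
  if (l.length : Int) = 2 then l else [-1]

-- ===== PORT B =====
-- one loop step of Source B: (first, second) updated by the next element x
def stepAlt (st : Option Int × Option Int) (x : Int) : Option Int × Option Int :=
  match st with
  | (none, _) => (some x, none)          -- second = first (= None); first = x
  | (some f, sec) =>
    if x < f then (some x, some f)       -- second = first; first = x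
    else if f < x then                   -- x > first and …
      match sec with
      | none => (some f, some x)
      | some sv => if x < sv then (some f, some x) else (some f, some sv)
    else (some f, sec)

def minAnd2ndMin_alt (a : List Int) (n : Int) : List Int :=
  match a.foldl stepAlt (none, none) with
  | (some f, some s) => [f, s]
  | _ => [-1]

-- ===== PRECONDITION & SPEC =====
def Spec_minAnd2ndMin (a : List Int) (n : Int) (out : List Int) : Prop := out = minAnd2ndMin_alt a n
instance (a : List Int) (n : Int) (out : List Int) : Decidable (Spec_minAnd2ndMin a n out) := by unfold Spec_minAnd2ndMin; infer_instance

-- ===== CLAIM (what is proved, stated in full; the proofs are below) =====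
def Claim_equal_minAnd2ndMin : Prop := ∀ (a : List Int) (n : Int), Dom_minAnd2ndMin a n → Spec_minAnd2ndMin a n (minAnd2ndMin a n)

-- ===== LEMMAS AND PROOFS =====

-- Invariant of B's scan: after processing P the state holds the minimum of P and
-- the least element of P strictly above it (each `none` iff it does not exist).
def GoodState (P : List Int) (st : Option Int × Option Int) : Prop :=
  match st with
  | (none, sec) => P = [] ∧ sec = none
  | (some f, none) => (f ∈ P ∧ ∀ y ∈ P, f ≤ y) ∧ (∀ y ∈ P, ¬ f < y)
  | (some f, some sv) => (f ∈ P ∧ ∀ y ∈ P, f ≤ y) ∧ (f < sv ∧ sv ∈ P ∧ ∀ y ∈ P, f < y → sv ≤ y)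

theorem goodState_step (P : List Int) (st : Option Int × Option Int) (x : Int)
    (h : GoodState P st) : GoodState (P ++ [x]) (stepAlt st x) := by
  rcases st with ⟨f?, s?⟩
  rcases f? with _ | f
  · rcases h with ⟨hP, hs⟩
    subst hP
    simp [stepAlt, GoodState]
  · rcases s? with _ | sv
    · rcases h with ⟨⟨hfm, hfle⟩, hno⟩
      simp only [stepAlt]
      split_ifs with h1 h2
      · -- x < f : new min x, second f
        refine ⟨⟨by simp, ?_⟩, h1, by simp [hfm], ?_⟩
        · intro y hy; rcases List.mem_append.mp hy with hy | hy
          · exact le_trans (le_of_lt h1) (hfle y hy)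
          · simp at hy; omega
        · intro y hy _; rcases List.mem_append.mp hy with hy | hy
          · exact hfle y hy
          · simp at hy; omega
      · -- f < x : second becomes x
        refine ⟨⟨by simp [hfm], ?_⟩, h2, by simp, ?_⟩
        · intro y hy; rcases List.mem_append.mp hy with hy | hy
          · exact hfle y hy
          · simp at hy; omega
        · intro y hy hfy; rcases List.mem_append.mp hy with hy | hy
          · exact absurd hfy (hno y hy)
          · simp at hy; omega
      · -- x = f : unchanged
        refine ⟨⟨by simp [hfm], ?_⟩, ?_⟩
        · intro y hy; rcases List.mem_append.mp hy with hy | hy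
          · exact hfle y hy
          · simp at hy; omega
        · intro y hy; rcases List.mem_append.mp hy with hy | hy
          · exact hno y hy
          · simp at hy; omega
    · rcases h with ⟨⟨hfm, hfle⟩, hlt, hsm, hsle⟩
      simp only [stepAlt]
      split_ifs with h1 h2 h3
      · -- x < f : new min x, second f (f is the least element above x)
        refine ⟨⟨by simp, ?_⟩, h1, by simp [hfm], ?_⟩
        · intro y hy; rcases List.mem_append.mp hy with hy | hy
          · exact le_trans (le_of_lt h1) (hfle y hy)
          · simp at hy; omega
        · intro y hy _; rcases List.mem_append.mp hy with hy | hy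
          · exact hfle y hy
          · simp at hy; omega
      · -- f < x < sv : second becomes x
        refine ⟨⟨by simp [hfm], ?_⟩, h2, by simp, ?_⟩
        · intro y hy; rcases List.mem_append.mp hy with hy | hy
          · exact hfle y hy
          · simp at hy; omega
        · intro y hy hfy; rcases List.mem_append.mp hy with hy | hy
          · exact le_trans (le_of_lt h3) (hsle y hy hfy)
          · simp at hy; omega
      · -- f < x, sv ≤ x : unchanged
        refine ⟨⟨by simp [hfm], ?_⟩, hlt, by simp [hsm], ?_⟩
        · intro y hy; rcases List.mem_append.mp hy with hy | hy
          · exact hfle y hy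
          · simp at hy; omega
        · intro y hy hfy; rcases List.mem_append.mp hy with hy | hy
          · exact hsle y hy hfy
          · simp at hy; omega
      · -- x = f : unchanged
        refine ⟨⟨by simp [hfm], ?_⟩, hlt, by simp [hsm], ?_⟩
        · intro y hy; rcases List.mem_append.mp hy with hy | hy
          · exact hfle y hy
          · simp at hy; omega
        · intro y hy hfy; rcases List.mem_append.mp hy with hy | hy
          · exact hsle y hy hfy
          · simp at hy; omega

theorem goodState_foldl (xs : List Int) : ∀ (P : List Int) (st : Option Int × Option Int),
    GoodState P st → GoodState (P ++ xs) (xs.foldl stepAlt st) := by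
  induction xs with
  | nil => intro P st h; simpa using h
  | cons x xs ih =>
    intro P st h
    have := ih (P ++ [x]) (stepAlt st x) (goodState_step P st x h)
    simpa [List.foldl_cons] using this

theorem goodState_scan (a : List Int) : GoodState a (a.foldl stepAlt (none, none)) := by
  have := goodState_foldl a [] (none, none) (by simp [GoodState])
  simpa using this

-- every element of a is an element of sorted(set(a)) and conversely
theorem mem_sortedSet (a : List Int) (x : Int) :
    x ∈ PySem.List.sorted (PySem.Set.ofList a) (fun x => x) false ↔ x ∈ a := by
  rw [PySem.List.mem_sorted, PySem.Set.mem_ofList]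

-- ===== VERDICT (by name: the statement is the Claim_ definition above) =====
theorem minAnd2ndMin_spec : Claim_equal_minAnd2ndMin := by
  intro a n _
  unfold Spec_minAnd2ndMin
  have hG := goodState_scan a
  have hpw := PySem.List.sorted_ofList_pairwise_lt (κ := Int) a
  have hmem := mem_sortedSet a
  simp only [minAnd2ndMin, minAnd2ndMin_alt]
  generalize hseq : PySem.List.sorted (PySem.Set.ofList a) (fun x => x) false = s at hpw hmem ⊢
  generalize hsteq : a.foldl stepAlt (none, none) = st at hG ⊢
  rcases s with _ | ⟨m, _ | ⟨sv, rest⟩⟩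
  · -- sorted(set(a)) = [] : a = [], both return [-1]
    have ha : a = [] := by
      rcases a with _ | ⟨x, a⟩
      · rfl
      · exact absurd ((hmem x).mpr (by simp)) (by simp)
    subst ha
    simp only [List.foldl_nil] at hsteq
    subst hsteq
    decide
  · -- exactly one distinct value : both return [-1]
    have hone : ∀ y ∈ a, y = m := fun y hy => by simpa using (hmem y).mpr hy
    have hB : (match st with | (some f, some s) => [f, s] | _ => [-1]) = [-1] := by
      rcases st with ⟨_ | f, _ | sv'⟩
      · rfl
      · rcases hG with ⟨_, h⟩; exact absurd h (by simp)
      · rfl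
      · exfalso
        rcases hG with ⟨⟨hfm, _⟩, hlt, hsm, _⟩
        have := hone f hfm; have := hone sv' hsm; omega
    rw [hB]
    norm_num
  · -- at least two distinct values : both return [m, sv]
    rcases List.pairwise_cons.mp hpw with ⟨hm_lt, hpw2⟩
    rcases List.pairwise_cons.mp hpw2 with ⟨hsv_lt, _⟩
    have hlen : (1 : Int) < ((m :: sv :: rest).length : Int) := by simp
    rw [if_pos hlen]
    have hr : PySem.List.pyRange 0 2 1 = [0, 1] := by decide
    rw [hr]
    simp only [List.foldl_cons, List.foldl_nil, List.nil_append]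
    have hget : ([PySem.List.pyGetD (m :: sv :: rest) 0 0] ++ [PySem.List.pyGetD (m :: sv :: rest) 1 0]) = [m, sv] := by
      norm_num [pysem]
    rw [hget]
    have hma : m ∈ a := (hmem m).mp (by simp)
    have hsva : sv ∈ a := (hmem sv).mp (by simp)
    have hmsv : m < sv := hm_lt sv (by simp)
    rcases st with ⟨_ | f, _ | sv'⟩
    · rcases hG with ⟨ha, _⟩; subst ha; simp at hma
    · rcases hG with ⟨ha, _⟩; subst ha; simp at hma
    · exfalso
      rcases hG with ⟨⟨hfm, hfle⟩, hno⟩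
      have hle := hfle m hma
      have hfs := (hmem f).mpr hfm
      have hf : f = m := by
        simp at hfs
        rcases hfs with hfs | hfs | hfs
        · exact hfs
        · omega
        · have := hm_lt f (by simp [hfs]); omega
      subst hf
      exact hno sv hsva hmsv
    · rcases hG with ⟨⟨hfm, hfle⟩, hlt, hsm, hsle⟩
      have hle := hfle m hma
      have hfs := (hmem f).mpr hfm
      have hf : f = m := by
        simp at hfs
        rcases hfs with hfs | hfs | hfs
        · exact hfs
        · omega
        · have := hm_lt f (by simp [hfs]); omega
      subst hf
      have hs' := (hmem sv').mpr hsm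
      have hsv' : sv' = sv := by
        simp at hs'
        rcases hs' with hs' | hs' | hs'
        · omega
        · exact hs'
        · have h1 := hsv_lt sv' hs'
          have h2 := hsle sv hsva hmsv
          omega
      subst hsv'
      norm_num
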